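-- pv_equiv track=rewrite | github.com/okrojekb/Podstawy-programowania-i-przetwarzania-danych | laby_09/2021-IAD-09.py | usun_najgorsz
-- ===== SOURCE A (Python) =====
-- def ilosc_alergenow(dane,k=5):
--     ile_alergenow = [None for i in range(len(dane))]
--     licznik = 0
--     for i in range(len(dane)):
--         suma = 0
--         for j in range(len(dane[0])):
--             if dane[i][j] == 1:
--                 suma += 1
--         if suma >= k:
--             licznik += 1
--         ile_alergenow[i] = suma
--     return ile_alergenow, licznik
--
-- def usun_najgorsz(dane,k):
--     ile_alergenow, licznik=ilosc_alergenow(dane,k)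
--     nowa_macierz=[None for i in range(len(dane)-licznik)]
--     licznik=0
--     for i in range(len(dane)):
--         if ile_alergenow[i]>=k:
--             continue
--         else:
--             nowa_macierz[licznik]=dane[i]
--             licznik+=1
--     return nowa_macierz
-- ===== SOURCE B (Python) =====
-- def usun_najgorsz(dane, k):
--     # Column-major accumulation: sweep the matrix column by column,
--     # maintaining a vector of per-row running counts, then zip it with the
--     # rows to select those still below k.
--     counts = [0] * len(dane)
--     for j in range(len(dane[0]) if dane else 0):
--         counts = [c + 1 if row[j] == 1 else c for c, row in zip(counts, dane)]
--     return [row for c, row in zip(counts, dane) if c < k]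
-- ===== Notes on version B (the rewrite author's own statement) =====
-- stated objective: alternative
-- what changed: Replaces A's row-major two-phase scheme (helper building a per-row count table plus bad-row counter, then a preallocated second copy pass) with a column-major sweep that maintains a vector of running per-row counts rebuilt once per column, followed by zipping the count vector with the rows to keep those below k.
import Mathlib
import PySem

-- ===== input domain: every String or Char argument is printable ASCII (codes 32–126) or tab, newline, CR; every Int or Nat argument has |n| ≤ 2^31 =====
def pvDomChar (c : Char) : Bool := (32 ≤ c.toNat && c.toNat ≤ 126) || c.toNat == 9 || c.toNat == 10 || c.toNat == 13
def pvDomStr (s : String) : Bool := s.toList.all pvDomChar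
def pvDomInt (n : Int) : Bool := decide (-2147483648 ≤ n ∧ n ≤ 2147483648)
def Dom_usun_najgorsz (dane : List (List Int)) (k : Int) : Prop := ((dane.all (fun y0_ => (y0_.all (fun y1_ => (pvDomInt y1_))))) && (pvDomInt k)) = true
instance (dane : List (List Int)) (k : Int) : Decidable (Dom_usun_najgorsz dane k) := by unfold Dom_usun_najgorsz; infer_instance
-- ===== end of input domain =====

-- B replaces A's row-major count-table + preallocated second copy pass with a
-- column-major sweep maintaining a vector of running per-row counts, then a zip
-- of that vector with the rows (objective: alternative traversal).

-- ===== PORT A =====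
-- helper ilosc_alergenow: per-row counts (index assignment into the preallocated
-- list, in index order, = append) and the bad-row counter; 'suma' inlined.
def ilosc_alergenow (dane : List (List Int)) (k : Int) : List Int × Int :=
  (PySem.List.pyRange 0 (PySem.List.len dane) 1).foldl
    (fun (st : List Int × Int) i =>
      (st.1 ++ [(PySem.List.pyRange 0 (PySem.List.len (PySem.List.pyGetD dane 0 [])) 1).foldl
          (fun s j => if PySem.List.pyGetD (PySem.List.pyGetD dane i []) j 0 = 1 then s + 1 else s) 0],
       if (PySem.List.pyRange 0 (PySem.List.len (PySem.List.pyGetD dane 0 [])) 1).foldl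
          (fun s j => if PySem.List.pyGetD (PySem.List.pyGetD dane i []) j 0 = 1 then s + 1 else s) 0 ≥ k
       then st.2 + 1 else st.2))
    ([], 0)

-- second pass: preallocated nowa_macierz filled at index licznik, in order, = append
def usun_najgorsz (dane : List (List Int)) (k : Int) : List (List Int) :=
  (PySem.List.pyRange 0 (PySem.List.len dane) 1).foldl
    (fun (acc : List (List Int)) i =>
      if PySem.List.pyGetD (ilosc_alergenow dane k).1 i 0 ≥ k then acc
      else acc ++ [PySem.List.pyGetD dane i []])
    []

-- ===== PORT B =====
-- 'range(len(dane[0]) if dane else 0)' → the if-guarded bound; each column j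
-- rebuilds counts via zip(counts, dane); final selection zips counts with rows.
def usun_najgorsz_alt (dane : List (List Int)) (k : Int) : List (List Int) :=
  let counts :=
    (PySem.List.pyRange 0 (if dane = [] then 0 else PySem.List.len (dane.headD [])) 1).foldl
      (fun (counts : List Int) j =>
        List.zipWith (fun c row => if PySem.List.pyGetD row j 0 = 1 then c + 1 else c) counts dane)
      (List.replicate dane.length (0 : Int))
  ((counts.zip dane).filter (fun p => p.1 < k)).map Prod.snd

-- ===== PRECONDITION & SPEC =====
-- Pre_ excludes exactly the ragged matrices on which Python A raises IndexError
-- (some row shorter than the first row); there A has no value (B raises too).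
def Pre_usun_najgorsz (dane : List (List Int)) (k : Int) : Prop :=
  ∀ row ∈ dane, (dane.headD []).length ≤ row.length
instance (dane : List (List Int)) (k : Int) : Decidable (Pre_usun_najgorsz dane k) := by unfold Pre_usun_najgorsz; infer_instance
def pvWitness_usun_najgorsz : List (List Int) × Int := ([[1, 1, 0], [0, 0, 0], [1, 1, 1]], 2)

def Spec_usun_najgorsz (dane : List (List Int)) (k : Int) (out : List (List Int)) : Prop := out = usun_najgorsz_alt dane k
instance (dane : List (List Int)) (k : Int) (out : List (List Int)) : Decidable (Spec_usun_najgorsz dane k out) := by unfold Spec_usun_najgorsz; infer_instance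

-- ===== CLAIM =====
def Claim_equal_usun_najgorsz : Prop := ∀ (dane : List (List Int)) (k : Int), Dom_usun_najgorsz dane k → Pre_usun_najgorsz dane k → Spec_usun_najgorsz dane k (usun_najgorsz dane k)

-- ===== LEMMAS AND PROOFS =====

-- per-row count of ones among the first m columns (the common characterisation)
def pvCnt (m : Nat) (row : List Int) : Int :=
  (PySem.List.pyRange 0 (m : Int) 1).foldl
    (fun s j => if PySem.List.pyGetD row j 0 = 1 then s + 1 else s) 0

-- ---- A side: A's result is the filter by pvCnt ----

theorem pv_foldl_fst_map (f : List Int → Int) (k : Int) (l : List (List Int)) (acc : List Int × Int) :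
    (l.foldl (fun (st : List Int × Int) row =>
        (st.1 ++ [f row], if f row ≥ k then st.2 + 1 else st.2)) acc).1
      = acc.1 ++ l.map f := by
  induction l generalizing acc with
  | nil => simp
  | cons x xs ih => simp [ih]

theorem ilosc_fst (dane : List (List Int)) (k : Int) :
    (ilosc_alergenow dane k).1
      = dane.map (fun row => pvCnt (dane.headD []).length row) := by
  unfold ilosc_alergenow pvCnt
  have hd : PySem.List.pyGetD dane 0 [] = dane.headD [] := by
    cases dane <;> simp [PySem.List.pyGetD_zero, List.getD]
  rw [hd,
      PySem.List.foldl_pyRange_zero_pyGetD dane []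
        (fun (st : List Int × Int) (row : List Int) =>
          (st.1 ++ [(PySem.List.pyRange 0 (PySem.List.len (dane.headD [])) 1).foldl
              (fun s j => if PySem.List.pyGetD row j 0 = 1 then s + 1 else s) 0],
           if (PySem.List.pyRange 0 (PySem.List.len (dane.headD [])) 1).foldl
              (fun s j => if PySem.List.pyGetD row j 0 = 1 then s + 1 else s) 0 ≥ k
           then st.2 + 1 else st.2)) ([], 0),
      pv_foldl_fst_map]
  simp

theorem pv_foldl_filter (f : List Int → Int) (k : Int) (l : List (List Int)) (acc : List (List Int)) :
    (l.foldl (fun (acc : List (List Int)) row =>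
        if f row ≥ k then acc else acc ++ [row]) acc)
      = acc ++ l.filter (fun row => decide (¬ f row ≥ k)) := by
  induction l generalizing acc with
  | nil => simp
  | cons x xs ih =>
    by_cases h : f x ≥ k
    · simp [h, ih]
    · simp [h, ih, lt_of_not_ge h]

theorem usun_najgorsz_eq_filter (dane : List (List Int)) (k : Int) :
    usun_najgorsz dane k
      = dane.filter (fun row => decide (¬ pvCnt (dane.headD []).length row ≥ k)) := by
  unfold usun_najgorsz
  rw [ilosc_fst]
  rw [PySem.List.foldl_congr_mem (g :=
      fun (acc : List (List Int)) i =>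
        if pvCnt (dane.headD []).length (PySem.List.pyGetD dane i []) ≥ k
        then acc else acc ++ [PySem.List.pyGetD dane i []])
      (h := by
        intro acc i hi
        have hmem := (PySem.List.mem_pyRange_one).1 hi
        simp only [PySem.List.len_eq] at hmem
        rw [PySem.List.pyGetD_eq_getElem _ 0 hmem.1 (by simpa using hmem.2),
            PySem.List.pyGetD_eq_getElem dane ([] : List Int) hmem.1 (by simpa using hmem.2)]
        simp [PySem.List.pyGetD_eq_getElem dane ([] : List Int) hmem.1 (by simpa using hmem.2)]),
      PySem.List.foldl_pyRange_zero_pyGetD dane []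
        (fun (acc : List (List Int)) (row : List Int) =>
          if pvCnt (dane.headD []).length row ≥ k
          then acc else acc ++ [row]) [],
      pv_foldl_filter]
  simp

-- ---- B side: the column-major sweep computes dane.map (pvCnt m) ----

theorem pv_zipWith_map {α β : Type} (g : β → α → β) (h : α → β) (l : List α) :
    List.zipWith g (l.map h) l = l.map (fun x => g (h x) x) := by
  induction l with
  | nil => rfl
  | cons x xs ih => simp [ih]

theorem pvCnt_succ (m : Nat) (row : List Int) :
    pvCnt (m + 1) row
      = (if PySem.List.pyGetD row (m : Int) 0 = 1 then pvCnt m row + 1 else pvCnt m row) := by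
  unfold pvCnt
  rw [show ((m + 1 : Nat) : Int) = (m : Int) + 1 by push_cast; ring,
      PySem.List.pyRange_one_succ_right (by positivity), List.foldl_append]
  simp

theorem pv_colfold (dane : List (List Int)) (m : Nat) :
    (PySem.List.pyRange 0 (m : Int) 1).foldl
      (fun (counts : List Int) j =>
        List.zipWith (fun c row => if PySem.List.pyGetD row j 0 = 1 then c + 1 else c) counts dane)
      (List.replicate dane.length (0 : Int))
    = dane.map (fun row => pvCnt m row) := by
  induction m with
  | zero =>
    rw [PySem.List.pyRange_one_eq_nil (by norm_num)]
    simp [pvCnt, PySem.List.pyRange_one_eq_nil]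
  | succ m ih =>
    rw [show ((m + 1 : Nat) : Int) = (m : Int) + 1 by push_cast; ring,
        PySem.List.pyRange_one_succ_right (by positivity), List.foldl_append]
    simp only [List.foldl_cons, List.foldl_nil, ih]
    rw [pv_zipWith_map]
    apply List.map_congr_left
    intro row _
    rw [pvCnt_succ]

theorem pv_zip_filter_map (f : List Int → Int) (k : Int) (l : List (List Int)) :
    ((((l.map f).zip l).filter (fun p => p.1 < k)).map Prod.snd)
      = l.filter (fun row => decide (f row < k)) := by
  induction l with
  | nil => rfl
  | cons x xs ih =>
    by_cases h : f x < k <;> simp [h, ih]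

theorem usun_najgorsz_alt_eq_filter (dane : List (List Int)) (k : Int) :
    usun_najgorsz_alt dane k
      = dane.filter (fun row => decide (pvCnt (dane.headD []).length row < k)) := by
  unfold usun_najgorsz_alt
  cases dane with
  | nil => rfl
  | cons x xs =>
    simp only [List.headD_cons, reduceCtorEq, if_false, PySem.List.len_eq]
    rw [pv_colfold (x :: xs) x.length, pv_zip_filter_map]
    rfl

-- ===== VERDICT =====
theorem usun_najgorsz_spec : Claim_equal_usun_najgorsz := by
  intro dane k _ _
  unfold Spec_usun_najgorsz
  rw [usun_najgorsz_eq_filter, usun_najgorsz_alt_eq_filter]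
  apply List.filter_congr
  intro row _
  simp [not_le]
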